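-- pv_equiv track=rewrite | github.com/icssc/SOCSpider | chunking.py | _end_interval
-- ===== SOURCE A (Python) =====
-- def _end_interval(interval: int, start_idx: int, code: int, codes: [int]) -> (int, int):
--     """
--         Grabs the end of an interval from a specific starting code
--
--         Args:
--             interval: interval we are testing against
--             start_idx: start idx of our interval
--             code: starting code of our interval
--             codes: list of all codes
--     """
--     # grab the absolutely highest code in the list
--     max_idx = len(codes) - 1
--     max_code = codes[-1]
--
--     # create potential end code of interval
--     end_of_interval = code + interval
--     if end_of_interval > max_code:
--         return max_code, max_idx
--     else:
--         # search for the highest code below the end interval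
--         for idx, c in enumerate(codes):
--             if c >= end_of_interval:
--                 return codes[idx - 1], idx - 1
--     # TODO: Clean up function, return conditional on if's that should always be reached but not edge case tested throughly, potential bugs
--     assert False, 'Interval function broke'
-- ===== SOURCE B (Python) =====
-- def _end_interval(interval: int, start_idx: int, code: int, codes: [int]) -> (int, int):
--     """Binary search for the leftmost insertion point of code + interval in the
--     ascending code list; the predecessor of that position is the highest code
--     strictly below the end of the interval."""
--     end_of_interval = code + interval
--     lo, hi = 0, len(codes)
--     while lo < hi:
--         mid = (lo + hi) // 2
--         if codes[mid] < end_of_interval: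
--             lo = mid + 1
--         else:
--             hi = mid
--     return codes[lo - 1], lo - 1
-- ===== Notes on version B (the rewrite author's own statement) =====
-- stated objective: alternative
-- what changed: Replaces A's linear forward scan (plus max-code shortcut branch) with a binary search for the leftmost insertion point of code+interval; Pre_ requires a nonempty codes list partitioned about code+interval (elements below it form a prefix, true of every ascending list, the function's contract): A raises IndexError on the empty list, and on lists unsorted around the threshold A's scan-order result is accidental.
-- outside the precondition, e.g. on _end_interval(1, 0, 5, [10, 3, 20]): A returns (20, -1), B returns (3, 1)
import Mathlib
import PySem

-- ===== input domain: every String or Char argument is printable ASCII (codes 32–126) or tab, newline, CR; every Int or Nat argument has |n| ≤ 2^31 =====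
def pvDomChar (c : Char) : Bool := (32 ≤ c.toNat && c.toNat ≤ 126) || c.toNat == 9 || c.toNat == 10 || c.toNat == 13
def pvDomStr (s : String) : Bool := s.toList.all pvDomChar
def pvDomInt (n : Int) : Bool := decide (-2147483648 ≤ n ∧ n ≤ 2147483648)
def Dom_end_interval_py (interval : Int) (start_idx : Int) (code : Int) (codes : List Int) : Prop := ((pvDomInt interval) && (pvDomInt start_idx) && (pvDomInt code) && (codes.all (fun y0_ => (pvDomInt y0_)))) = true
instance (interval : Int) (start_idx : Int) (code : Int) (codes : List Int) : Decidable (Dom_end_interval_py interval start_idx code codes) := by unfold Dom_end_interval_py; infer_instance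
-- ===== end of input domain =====

-- B replaces A's linear forward scan with a binary search for the leftmost insertion
-- point of code + interval in the ascending code list (objective: alternative).

-- ===== PORT A =====
-- the 'for idx, c in enumerate(codes)' loop; `codes` is the full list, `rem` the remainder
def endIntervalScanA (eoi : Int) (codes : List Int) : List Int → Int → Int × Int
  | [], _ => (0, 0)          -- 'assert False' (AssertionError; outside Pre_)
  | c :: rem, idx =>
    if eoi ≤ c then
      match PySem.List.pyGet? codes (idx - 1) with   -- codes[idx - 1] (idx = 0 wraps to -1)
      | some v => (v, idx - 1)
      | none => (0, 0)       -- IndexError (unreachable: 0 ≤ idx ≤ len)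
    else endIntervalScanA eoi codes rem (idx + 1)

def end_interval_py (interval : Int) (start_idx : Int) (code : Int) (codes : List Int) : Int × Int :=
  let max_idx : Int := (codes.length : Int) - 1
  match PySem.List.pyGet? codes (-1) with            -- codes[-1]
  | none => (0, 0)           -- IndexError on empty codes (outside Pre_)
  | some max_code =>
    let end_of_interval := code + interval
    if end_of_interval > max_code then (max_code, max_idx)
    else endIntervalScanA end_of_interval codes codes 0

-- ===== PORT B =====
-- the 'while lo < hi' loop of Source B, with fuel ≥ hi - lo as a structural totality guard;
-- codes.getD mid 0 is codes[mid], exact since lo ≤ mid < hi ≤ len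
def bsearchB (eoi : Int) (codes : List Int) : Nat → Nat → Nat → Nat
  | 0, lo, _ => lo
  | fuel + 1, lo, hi =>
    if lo < hi then
      let mid := (lo + hi) / 2
      if codes.getD mid 0 < eoi then bsearchB eoi codes fuel (mid + 1) hi
      else bsearchB eoi codes fuel lo mid
    else lo

def end_interval_py_alt (interval : Int) (start_idx : Int) (code : Int) (codes : List Int) : Int × Int :=
  let end_of_interval := code + interval
  let lo := bsearchB end_of_interval codes codes.length 0 codes.length
  match PySem.List.pyGet? codes ((lo : Int) - 1) with   -- codes[lo - 1] (lo = 0 wraps to -1)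
  | some v => (v, (lo : Int) - 1)
  | none => (0, 0)           -- IndexError on empty codes (outside Pre_)

-- ===== PRECONDITION & SPEC =====
-- Pre_ excludes the empty list, on which A raises IndexError at codes[-1], and lists not
-- partitioned about the threshold code + interval (the elements below it must form a
-- prefix — true of every ascending list, the function's contract): on such lists A's
-- scan-order-dependent result is accidental.
def Pre_end_interval_py (interval : Int) (start_idx : Int) (code : Int) (codes : List Int) : Prop :=
  codes ≠ [] ∧ ∀ i < codes.length, ∀ j < codes.length, i ≤ j →
    codes.getD j 0 < code + interval → codes.getD i 0 < code + interval

instance (interval : Int) (start_idx : Int) (code : Int) (codes : List Int) : Decidable (Pre_end_interval_py interval start_idx code codes) := by unfold Pre_end_interval_py; infer_instance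

def pvWitness_end_interval_py : Int × Int × Int × List Int := (1, 0, 5, [3, 7])

def Spec_end_interval_py (interval : Int) (start_idx : Int) (code : Int) (codes : List Int) (out : Int × Int) : Prop := out = end_interval_py_alt interval start_idx code codes
instance (interval : Int) (start_idx : Int) (code : Int) (codes : List Int) (out : Int × Int) : Decidable (Spec_end_interval_py interval start_idx code codes out) := by unfold Spec_end_interval_py; infer_instance

-- ===== CLAIM (what is proved, stated in full; the proofs are below) =====
def Claim_equal_end_interval_py : Prop := ∀ (interval : Int) (start_idx : Int) (code : Int) (codes : List Int), Dom_end_interval_py interval start_idx code codes → Pre_end_interval_py interval start_idx code codes → Spec_end_interval_py interval start_idx code codes (end_interval_py interval start_idx code codes)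

-- ===== LEMMAS AND PROOFS =====

-- the index (≤ len) with 'everything before < eoi' and 'at it ≥ eoi (if < len)' is unique
theorem firstGE_unique (eoi : Int) : ∀ (codes : List Int) (r s : Nat),
    r ≤ codes.length → s ≤ codes.length →
    (∀ i (h : i < codes.length), i < r → codes[i] < eoi) →
    (∀ h : r < codes.length, eoi ≤ codes[r]) →
    (∀ i (h : i < codes.length), i < s → codes[i] < eoi) →
    (∀ h : s < codes.length, eoi ≤ codes[s]) →
    r = s := by
  intro codes r s hr hs hrb hra hsb hsa
  by_contra hne
  rcases Nat.lt_or_ge r s with h | h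
  · have h1 := hsb r (by omega) h
    have h2 := hra (by omega)
    omega
  · have h' : s < r := by omega
    have h1 := hrb s (by omega) h'
    have h2 := hsa (by omega)
    omega

-- A's enumerate-scan, characterised: if some element of the remainder is ≥ eoi, the scan
-- returns the (idx-1) lookup at the first such position
theorem scanA_spec (eoi : Int) (codes : List Int) :
    ∀ (rem : List Int) (k : Nat), (∃ c ∈ rem, eoi ≤ c) →
    ∃ (m : Nat) (hm : m < rem.length), eoi ≤ rem[m] ∧
      (∀ i (h : i < rem.length), i < m → rem[i] < eoi) ∧
      endIntervalScanA eoi codes rem (k : Int) =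
        (match PySem.List.pyGet? codes ((k : Int) + m - 1) with
         | some v => (v, (k : Int) + m - 1)
         | none => (0, 0)) := by
  intro rem
  induction rem with
  | nil => intro k hex; simp at hex
  | cons c rest ih =>
    intro k hex
    by_cases hc : eoi ≤ c
    · refine ⟨0, by simp, by simpa using hc, by omega, ?_⟩
      simp only [endIntervalScanA, hc, if_true, Nat.cast_zero, add_zero]
    · have hex' : ∃ d ∈ rest, eoi ≤ d := by
        rcases hex with ⟨d, hd, hde⟩
        rcases List.mem_cons.mp hd with rfl | hd'
        · exact absurd hde hc
        · exact ⟨d, hd', hde⟩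
      obtain ⟨m, hm, hge, hbefore, heq⟩ := ih (k + 1) hex'
      refine ⟨m + 1, by simpa using Nat.succ_lt_succ hm, by simpa using hge, ?_, ?_⟩
      · intro i h hi'
        cases i with
        | zero => simpa using lt_of_not_ge hc
        | succ i' =>
          have := hbefore i' (by simpa using Nat.lt_of_succ_lt_succ h) (by omega)
          simpa using this
      · simp only [endIntervalScanA, hc, if_false]
        have hc1 : ((k : Int) + 1) = ((k + 1 : Nat) : Int) := by push_cast; ring
        rw [hc1, heq]
        have : ((k + 1 : Nat) : Int) + (m : Int) - 1 = (k : Int) + ((m + 1 : Nat) : Int) - 1 := by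
          push_cast; ring
        rw [this]

-- B's binary search, characterised: from an invariant-satisfying window it returns the
-- unique boundary index
theorem bsearchB_spec (eoi : Int) (codes : List Int)
    (hp : ∀ i < codes.length, ∀ j < codes.length, i ≤ j →
      codes.getD j 0 < eoi → codes.getD i 0 < eoi) :
    ∀ (fuel lo hi : Nat), hi - lo ≤ fuel → lo ≤ hi → hi ≤ codes.length →
    (∀ i < lo, codes.getD i 0 < eoi) →
    (∀ i, hi ≤ i → i < codes.length → eoi ≤ codes.getD i 0) →
    bsearchB eoi codes fuel lo hi ≤ codes.length ∧
    (∀ i < bsearchB eoi codes fuel lo hi, codes.getD i 0 < eoi) ∧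
    (∀ i, bsearchB eoi codes fuel lo hi ≤ i → i < codes.length → eoi ≤ codes.getD i 0) := by
  intro fuel
  induction fuel with
  | zero =>
    intro lo hi hn hle hlen hlow hhigh
    have : lo = hi := by omega
    subst this
    simp only [bsearchB]
    exact ⟨by omega, hlow, hhigh⟩
  | succ n ih =>
    intro lo hi hn hle hlen hlow hhigh
    by_cases h : lo < hi
    · rw [bsearchB, if_pos h]
      simp only []
      set mid := (lo + hi) / 2 with hmid
      have hmlo : lo ≤ mid := by omega
      have hmhi : mid < hi := by omega
      by_cases hc : codes.getD mid 0 < eoi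
      · rw [if_pos hc]
        refine ih (mid + 1) hi (by omega) (by omega) hlen ?_ hhigh
        intro i hi'
        rcases Nat.lt_or_ge i lo with h' | h'
        · exact hlow i h'
        · exact hp i (by omega) mid (by omega) (by omega) hc
      · rw [if_neg hc]
        push_neg at hc
        refine ih lo mid (by omega) (by omega) (by omega) hlow ?_
        intro i him hilen
        by_contra hlt
        push_neg at hlt
        exact absurd (hp mid (by omega) i hilen him hlt) (not_lt.mpr hc)
    · rw [bsearchB, if_neg h]
      have : lo = hi := by omega
      subst this
      exact ⟨by omega, hlow, hhigh⟩

-- ===== VERDICT (by name: the statement is the Claim_ definition above) =====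
theorem end_interval_py_spec : Claim_equal_end_interval_py := by
  intro interval start_idx code codes _hdom hpre
  obtain ⟨hne, hpart⟩ := hpre
  unfold Spec_end_interval_py
  have hlen : 0 < codes.length := List.length_pos_iff.mpr hne
  set eoi : Int := code + interval with heoi
  have hlast : PySem.List.pyGet? codes (-1) = some (codes[codes.length - 1]) := by
    rw [PySem.List.pyGet?_neg_one, List.getLast?_eq_getElem?,
        List.getElem?_eq_getElem (by omega)]
  have hgetD : ∀ i (h : i < codes.length), codes.getD i 0 = codes[i] := by
    intro i h
    rw [List.getD_eq_getElem?_getD, List.getElem?_eq_getElem h]; rfl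
  set r := bsearchB eoi codes codes.length 0 codes.length with hr
  obtain ⟨hrlen, hrlow, hrhigh⟩ :=
    bsearchB_spec eoi codes hpart codes.length 0 codes.length (by omega) (by omega)
      (le_refl _) (by omega) (by omega)
  have hB : end_interval_py_alt interval start_idx code codes =
      (match PySem.List.pyGet? codes ((r : Int) - 1) with
       | some v => (v, (r : Int) - 1)
       | none => (0, 0)) := by
    simp only [end_interval_py_alt, ← heoi, ← hr]
  by_cases hbig : eoi > codes[codes.length - 1]
  · -- A takes the max-code shortcut; B's search pushes lo all the way to len
    have hA : end_interval_py interval start_idx code codes =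
        (codes[codes.length - 1], (codes.length : Int) - 1) := by
      simp only [end_interval_py, hlast, ← heoi, hbig, if_true]
    have hrfull : r = codes.length := by
      by_contra hneq
      have hrlt : r < codes.length := by omega
      have h1 := hrhigh r (le_refl _) hrlt
      have h2 := hpart r hrlt (codes.length - 1) (by omega) (by omega)
        (by rw [hgetD (codes.length - 1) (by omega)]; omega)
      rw [hgetD r hrlt] at h1 h2
      omega
    rw [hA, hB, hrfull]
    have hidx : (codes.length : Int) - 1 = ((codes.length - 1 : Nat) : Int) := by
      push_cast [Nat.cast_sub (by omega : 1 ≤ codes.length)]; ring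
    rw [hidx, PySem.List.pyGet?_natCast, List.getElem?_eq_getElem (by omega)]
  · -- A scans forward for the first code ≥ eoi; B's search lands on the same index
    push_neg at hbig
    have hA : end_interval_py interval start_idx code codes =
        endIntervalScanA eoi codes codes 0 := by
      simp only [end_interval_py, hlast, ← heoi]
      rw [if_neg (not_lt.mpr hbig)]
    obtain ⟨m, hm, hge, hbefore, heq⟩ := scanA_spec eoi codes codes 0
      ⟨codes[codes.length - 1], List.getElem_mem _, hbig⟩
    have hmm : m = r := by
      apply firstGE_unique eoi codes m r (by omega) hrlen hbefore (fun _ => hge)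
      · intro i h hi'
        have := hrlow i hi'
        rwa [hgetD i h] at this
      · intro h
        have := hrhigh r (le_refl _) h
        rwa [hgetD r h] at this
    simp only [Nat.cast_zero, zero_add] at heq
    rw [hA, hB, heq, hmm]
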